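-- pv_equiv track=rewrite | github.com/posl/comment_recommendation | script/mod_gen/4_time/zh/185_D/3.py | stamp
-- ===== SOURCE A (Python) =====
-- def stamp(N, M, A):
--     if M == 0:
--         return 1
--     A.sort()
--     B = []
--     for i in range(M):
--         if i == 0:
--             B.append(A[i] - 1)
--         else:
--             B.append(A[i] - A[i-1] - 1)
--     B.append(N - A[M-1])
--     if M == 1:
--         return B[0]
--     C = []
--     for i in range(M):
--         if i == 0:
--             C.append(B[i] + B[i+1])
--         elif i == M-1:
--             C.append(B[i-1] + B[i])
--         else:
--             C.append(B[i-1] + B[i] + B[i+1])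
--     return min(C)
-- ===== SOURCE B (Python) =====
-- def stamp(N, M, A):
--     # Prefix-sum re-implementation: build the gap list once, then a prefix-sum
--     # table P so each window cost is an O(1) difference P[hi]-P[lo].
--     # Note: sorts A in place, like the original.
--     if M == 0:
--         return 1
--     A.sort()
--     if M == 1:
--         return A[0] - 1
--     g = [A[0] - 1] + [A[i] - A[i-1] - 1 for i in range(1, M)] + [N - A[M-1]]
--     P = [0]
--     for x in g:
--         P.append(P[-1] + x)
--     best = P[2] - P[0]
--     for i in range(1, M - 1):
--         best = min(best, P[i+2] - P[i-1])
--     return min(best, P[M] - P[M-2])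
-- ===== Notes on version B (the rewrite author's own statement) =====
-- stated objective: alternative
-- what changed: Replaces the second pass that re-sums adjacent gap entries into a list C and takes min(C) by a prefix-sum table over the gap list, so every window cost is an O(1) difference P[hi]-P[lo] folded into a running minimum (no intermediate C list).
import Mathlib
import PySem

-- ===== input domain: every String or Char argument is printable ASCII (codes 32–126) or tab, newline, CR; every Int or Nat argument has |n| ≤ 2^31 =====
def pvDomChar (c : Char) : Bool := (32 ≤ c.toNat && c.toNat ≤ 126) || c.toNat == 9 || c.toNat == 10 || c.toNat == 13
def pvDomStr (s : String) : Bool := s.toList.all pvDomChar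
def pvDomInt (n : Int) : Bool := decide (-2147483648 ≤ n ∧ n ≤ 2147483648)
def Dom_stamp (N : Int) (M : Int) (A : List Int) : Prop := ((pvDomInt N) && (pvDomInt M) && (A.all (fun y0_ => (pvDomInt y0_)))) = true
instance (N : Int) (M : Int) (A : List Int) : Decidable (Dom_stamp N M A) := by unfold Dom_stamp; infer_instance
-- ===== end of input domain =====

-- B replaces A's second pass (re-summing adjacent gap entries into a list C and taking min(C))
-- by a prefix-sum table over the gap list, folding O(1) window differences into a running minimum.
-- Both versions sort A in place in Python; the equivalence proved here is about the return value.

-- ===== PORT A =====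
def stamp (N : Int) (M : Int) (A : List Int) : Int :=
  if M = 0 then 1
  else
    let As := PySem.List.sorted A (fun x => x) false
    let B := (PySem.List.pyRange 0 M 1).foldl (fun B i =>
      B ++ [if i = 0 then PySem.List.pyGetD As i 0 - 1
            else PySem.List.pyGetD As i 0 - PySem.List.pyGetD As (i-1) 0 - 1]) []
    let B := B ++ [N - PySem.List.pyGetD As (M-1) 0]
    if M = 1 then PySem.List.pyGetD B 0 0
    else
      let C := (PySem.List.pyRange 0 M 1).foldl (fun C i =>
        C ++ [if i = 0 then PySem.List.pyGetD B i 0 + PySem.List.pyGetD B (i+1) 0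
              else if i = M - 1 then PySem.List.pyGetD B (i-1) 0 + PySem.List.pyGetD B i 0
              else PySem.List.pyGetD B (i-1) 0 + PySem.List.pyGetD B i 0 + PySem.List.pyGetD B (i+1) 0]) []
      (PySem.List.min? C (fun x => x)).getD 0

-- ===== PORT B =====
def stamp_alt (N : Int) (M : Int) (A : List Int) : Int :=
  if M = 0 then 1
  else
    let As := PySem.List.sorted A (fun x => x) false
    if M = 1 then PySem.List.pyGetD As 0 0 - 1
    else
      let g := [PySem.List.pyGetD As 0 0 - 1]
        ++ (PySem.List.pyRange 1 M 1).map
             (fun i => PySem.List.pyGetD As i 0 - PySem.List.pyGetD As (i-1) 0 - 1)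
        ++ [N - PySem.List.pyGetD As (M-1) 0]
      let P := g.foldl (fun P x => P ++ [PySem.List.pyGetD P (-1) 0 + x]) [0]
      let best := PySem.List.pyGetD P 2 0 - PySem.List.pyGetD P 0 0
      let best := (PySem.List.pyRange 1 (M-1) 1).foldl
        (fun b i => min b (PySem.List.pyGetD P (i+2) 0 - PySem.List.pyGetD P (i-1) 0)) best
      min best (PySem.List.pyGetD P M 0 - PySem.List.pyGetD P (M-2) 0)

-- ===== PRECONDITION & SPEC =====
-- Pre_ excludes exactly the inputs where A raises: M > len(A) hits an IndexError on A[i],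
-- and M < 0 reaches min([]) (ValueError); on all other inputs A returns normally.
def Pre_stamp (N : Int) (M : Int) (A : List Int) : Prop := 0 ≤ M ∧ M ≤ (A.length : Int)
instance (N : Int) (M : Int) (A : List Int) : Decidable (Pre_stamp N M A) := by unfold Pre_stamp; infer_instance
def pvWitness_stamp : Int × Int × List Int := (6, 2, [2, 5])
def Spec_stamp (N : Int) (M : Int) (A : List Int) (out : Int) : Prop := out = stamp_alt N M A
instance (N : Int) (M : Int) (A : List Int) (out : Int) : Decidable (Spec_stamp N M A out) := by unfold Spec_stamp; infer_instance

-- ===== CLAIM (what is proved, stated in full; the proofs are below) =====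
def Claim_equal_stamp : Prop := ∀ (N : Int) (M : Int) (A : List Int), Dom_stamp N M A → Pre_stamp N M A → Spec_stamp N M A (stamp N M A)

-- ===== LEMMAS AND PROOFS =====

-- Scan of running sums starting from s (the values B's prefix-sum loop appends).
def pvScan (s : Int) : List Int → List Int
  | [] => []
  | x :: xs => (s + x) :: pvScan (s + x) xs

theorem pvScan_length (s : Int) (g : List Int) : (pvScan s g).length = g.length := by
  induction g generalizing s with
  | nil => rfl
  | cons x xs ih => simp [pvScan, ih]

theorem foldl_pvStep (g : List Int) (acc : List Int) (h : acc ≠ []) :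
    g.foldl (fun P x => P ++ [PySem.List.pyGetD P (-1) 0 + x]) acc
      = acc ++ pvScan (acc.getLast h) g := by
  induction g generalizing acc with
  | nil => simp [pvScan]
  | cons x xs ih =>
    rw [List.foldl_cons, PySem.List.pyGetD_neg_one acc 0 h,
        ih (acc ++ [acc.getLast h + x]) (by simp)]
    have hlast : (acc ++ [acc.getLast h + x]).getLast (by simp) = acc.getLast h + x := by
      simp
    rw [hlast]
    simp [pvScan]

theorem pvScan_getElem (g : List Int) (s : Int) (k : Nat) (h : k < g.length) :
    (pvScan s g)[k]'(by rw [pvScan_length]; exact h) = s + (g.take (k+1)).sum := by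
  induction g generalizing s k with
  | nil => simp at h
  | cons x xs ih =>
    cases k with
    | zero => simp [pvScan]
    | succ k =>
      have hk : k < xs.length := by simpa using h
      simp only [pvScan, List.getElem_cons_succ]
      rw [ih (s + x) k hk, List.take_succ_cons, List.sum_cons]
      ring

-- pvP l is B's prefix-sum list P built from the gap list l.
def pvP (g : List Int) : List Int :=
  g.foldl (fun P x => P ++ [PySem.List.pyGetD P (-1) 0 + x]) [0]

theorem pvP_eq (g : List Int) : pvP g = 0 :: pvScan 0 g := by
  unfold pvP
  rw [foldl_pvStep g [0] (by simp)]
  simp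

theorem pvP_getD (g : List Int) (k : Int) (h0 : 0 ≤ k) (hk : k ≤ (g.length : Int)) :
    PySem.List.pyGetD (pvP g) k 0 = (g.take k.toNat).sum := by
  obtain ⟨n, rfl⟩ : ∃ n : Nat, k = (n : Int) := ⟨k.toNat, by omega⟩
  rw [pvP_eq, PySem.List.pyGetD_natCast, Int.toNat_natCast]
  cases n with
  | zero => simp
  | succ n =>
    have hn : n < g.length := by
      push_cast at hk
      omega
    rw [List.getD_cons_succ,
        List.getD_eq_getElem _ _ (by rw [pvScan_length]; exact hn),
        pvScan_getElem g 0 n hn, zero_add]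

-- A prefix-sum difference is the sum of the gap entries of the window.
theorem Psum_window (l : List Int) (a b : Int) (h0 : 0 ≤ a) (hab : a ≤ b)
    (hb : b ≤ (l.length : Int)) :
    PySem.List.pyGetD (pvP l) b 0 - PySem.List.pyGetD (pvP l) a 0
      = ((PySem.List.pyRange a b 1).map (fun i => PySem.List.pyGetD l i 0)).sum := by
  have main : ∀ (n : Nat) (b : Int), a ≤ b → b ≤ (l.length : Int) → (b - a).toNat = n →
      PySem.List.pyGetD (pvP l) b 0 - PySem.List.pyGetD (pvP l) a 0
        = ((PySem.List.pyRange a b 1).map (fun i => PySem.List.pyGetD l i 0)).sum := by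
    intro n
    induction n with
    | zero =>
      intro b hab hb hn
      have hba : b = a := by omega
      subst hba
      rw [PySem.List.pyRange_one_eq_nil (le_refl b)]
      simp
    | succ n ih =>
      intro b hab hb hn
      have hab1 : a ≤ b - 1 := by omega
      have hsp : PySem.List.pyRange a b 1 = PySem.List.pyRange a (b-1) 1 ++ [b-1] := by
        have hh := PySem.List.pyRange_one_succ_right (a := a) (b := b-1) hab1
        rw [sub_add_cancel] at hh
        exact hh
      rw [hsp, List.map_append, List.sum_append,
          ← ih (b-1) hab1 (by omega) (by omega)]
      have hk : (b-1).toNat < l.length := by omega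
      have hPb : PySem.List.pyGetD (pvP l) b 0 = (l.take b.toNat).sum :=
        pvP_getD l b (by omega) hb
      have hPb1 : PySem.List.pyGetD (pvP l) (b-1) 0 = (l.take (b-1).toNat).sum :=
        pvP_getD l (b-1) (by omega) (by omega)
      have hbt : b.toNat = (b-1).toNat + 1 := by omega
      have hsum : (l.take ((b-1).toNat + 1)).sum = (l.take (b-1).toNat).sum + l[(b-1).toNat] :=
        List.sum_take_succ l _ hk
      have hg : PySem.List.pyGetD l (b-1) 0 = l[(b-1).toNat]'hk := by
        rw [PySem.List.pyGetD_eq_getElem]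
        · omega
        · omega
      simp only [List.map_cons, List.map_nil, List.sum_cons, List.sum_nil, add_zero]
      rw [hPb, hPb1, hbt, hsum, hg]
      ring
  exact main _ b hab hb rfl

-- B's gap list equals the list A's first loop builds (followed by the trailing gap).
theorem gaps_eq (N : Int) (M : Int) (As : List Int) (h2 : 2 ≤ M) :
    [PySem.List.pyGetD As 0 0 - 1]
      ++ (PySem.List.pyRange 1 M 1).map
           (fun i => PySem.List.pyGetD As i 0 - PySem.List.pyGetD As (i-1) 0 - 1)
      ++ [N - PySem.List.pyGetD As (M-1) 0]
    = ((PySem.List.pyRange 0 M 1).foldl (fun B i =>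
        B ++ [if i = 0 then PySem.List.pyGetD As i 0 - 1
              else PySem.List.pyGetD As i 0 - PySem.List.pyGetD As (i-1) 0 - 1]) [])
      ++ [N - PySem.List.pyGetD As (M-1) 0] := by
  rw [PySem.List.foldl_append_singleton_eq_map, List.nil_append,
      PySem.List.pyRange_one_cons (show (0:Int) < M by omega), List.map_cons]
  simp only [List.cons_append, List.nil_append]
  congr 2
  apply List.map_congr_left
  intro i hi
  have h1 : 1 ≤ i := ((PySem.List.mem_pyRange_one).mp hi).1
  rw [if_neg (by omega)]

-- The core equality: A's min over the window list C equals B's prefix-sum fold,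
-- for any gap list l of length M+1.
theorem windows_eq (M : Int) (l : List Int) (h2 : 2 ≤ M)
    (hl : (l.length : Int) = M + 1) :
    (PySem.List.min? ((PySem.List.pyRange 0 M 1).foldl (fun C i =>
        C ++ [if i = 0 then PySem.List.pyGetD l i 0 + PySem.List.pyGetD l (i+1) 0
              else if i = M - 1 then PySem.List.pyGetD l (i-1) 0 + PySem.List.pyGetD l i 0
              else PySem.List.pyGetD l (i-1) 0 + PySem.List.pyGetD l i 0
                     + PySem.List.pyGetD l (i+1) 0]) [])
      (fun x => x)).getD 0
    = min ((PySem.List.pyRange 1 (M-1) 1).foldl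
          (fun b i => min b (PySem.List.pyGetD (pvP l) (i+2) 0
                               - PySem.List.pyGetD (pvP l) (i-1) 0))
          (PySem.List.pyGetD (pvP l) 2 0 - PySem.List.pyGetD (pvP l) 0 0))
        (PySem.List.pyGetD (pvP l) M 0 - PySem.List.pyGetD (pvP l) (M-2) 0) := by
  rw [PySem.List.foldl_append_singleton_eq_map, List.nil_append,
      PySem.List.pyRange_one_cons (show (0:Int) < M by omega), List.map_cons,
      PySem.List.min?_id_cons, Option.getD_some, List.foldl_map]
  rw [show (0:Int) + 1 = 1 by norm_num]
  have hsplit : PySem.List.pyRange 1 M 1 = PySem.List.pyRange 1 (M-1) 1 ++ [M-1] := by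
    have hh := PySem.List.pyRange_one_succ_right (a := 1) (b := M-1) (by omega)
    rw [sub_add_cancel] at hh
    exact hh
  rw [hsplit, List.foldl_append, List.foldl_cons, List.foldl_nil]
  rw [if_neg (show ¬ (M - 1 = 0) by omega), if_pos (rfl : M - 1 = M - 1),
      if_pos (rfl : (0:Int) = 0)]
  rw [Psum_window l 0 2 (by omega) (by omega) (by omega),
      Psum_window l (M-2) M (by omega) (by omega) (by omega)]
  have r2 : PySem.List.pyRange 0 2 1 = [0, 1] := by
    rw [PySem.List.pyRange_one_cons (by omega), PySem.List.pyRange_one_cons (by omega),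
        PySem.List.pyRange_one_eq_nil (by omega)]
    norm_num
  have rM : PySem.List.pyRange (M-2) M 1 = [M-2, M-1] := by
    rw [PySem.List.pyRange_one_cons (by omega), PySem.List.pyRange_one_cons (by omega),
        PySem.List.pyRange_one_eq_nil (by omega)]
    have hx : M - 2 + 1 = M - 1 := by ring
    rw [hx]
  rw [r2, rM]
  simp only [List.map_cons, List.map_nil, List.sum_cons, List.sum_nil, add_zero]
  have hxM : M - 1 - 1 = M - 2 := by ring
  rw [hxM]
  congr 1
  apply PySem.List.foldl_congr_mem
  intro acc i hi
  obtain ⟨hi1, hi2⟩ := (PySem.List.mem_pyRange_one).mp hi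
  rw [if_neg (by omega), if_neg (by omega),
      Psum_window l (i-1) (i+2) (by omega) (by omega) (by omega)]
  have r3 : PySem.List.pyRange (i-1) (i+2) 1 = [i-1, i, i+1] := by
    rw [PySem.List.pyRange_one_cons (by omega), PySem.List.pyRange_one_cons (by omega),
        PySem.List.pyRange_one_cons (by omega), PySem.List.pyRange_one_eq_nil (by omega)]
    have hx : i - 1 + 1 = i := by ring
    rw [hx]
  rw [r3]
  simp only [List.map_cons, List.map_nil, List.sum_cons, List.sum_nil, add_zero]
  congr 1
  ring

-- ===== VERDICT (by name: the statement is the Claim_ definition above) =====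
theorem stamp_spec : Claim_equal_stamp := by
  intro N M A _ hP
  obtain ⟨hM0, hMA⟩ := hP
  show stamp N M A = stamp_alt N M A
  simp only [stamp, stamp_alt]
  by_cases h0 : M = 0
  · simp [h0]
  · rw [if_neg h0, if_neg h0]
    have hLlen : ((PySem.List.sorted A (fun x => x) false).length : Int) = (A.length : Int) := by
      rw [PySem.List.length_sorted]
    set L := PySem.List.sorted A (fun x => x) false with hLdef
    by_cases h1 : M = 1
    · subst h1
      rw [if_pos rfl, if_pos rfl]
      rw [PySem.List.foldl_append_singleton_eq_map, List.nil_append]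
      have hr : PySem.List.pyRange 0 1 1 = [0] := by
        simpa using PySem.List.pyRange_one_singleton (a := (0:Int))
      rw [hr]
      simp [PySem.List.pyGetD_zero]
    · have h2 : 2 ≤ M := by omega
      rw [if_neg h1, if_neg h1]
      rw [← gaps_eq N M L h2]
      have key := windows_eq M
        ([PySem.List.pyGetD L 0 0 - 1]
          ++ (PySem.List.pyRange 1 M 1).map
               (fun i => PySem.List.pyGetD L i 0 - PySem.List.pyGetD L (i-1) 0 - 1)
          ++ [N - PySem.List.pyGetD L (M-1) 0]) h2
        (by
          simp only [List.length_append, List.length_cons, List.length_nil,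
            List.length_map, PySem.List.length_pyRange_one]
          push_cast
          omega)
      simpa only [pvP] using key
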